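-- pv_equiv track=rewrite | github.com/shrine2000/DSA | Stack/stack_algorithms.py | next_greater_to_right
-- ===== SOURCE A (Python) =====
-- def next_greater_to_right(arr):
--     """
--     Find the Next Greater to Right (NGR) for each element in the array.
--     """
--     stack = []
--     result = [None] * len(arr)
--
--     for i in range(len(arr) - 1, -1, -1):
--         while stack and stack[-1] <= arr[i]:
--             stack.pop()
--         if stack:
--             result[i] = stack[-1]
--         stack.append(arr[i])
--
--     return result
-- ===== SOURCE B (Python) =====
-- def next_greater_to_right(arr):
--     """
--     Find the Next Greater to Right (NGR) for each element in the array.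
--
--     Brute force: for each position, scan forward for the first strictly
--     greater element (None if there is none).
--     """
--     n = len(arr)
--     result = [None] * n
--     for i in range(n):
--         for j in range(i + 1, n):
--             if arr[j] > arr[i]:
--                 result[i] = arr[j]
--                 break
--     return result
-- ===== Notes on version B (the rewrite author's own statement) =====
-- stated objective: simpler
-- what changed: Replaces the right-to-left monotonic stack with a plain nested scan: each entry is the first strictly greater element found by scanning forward from that position.
import Mathlib
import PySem

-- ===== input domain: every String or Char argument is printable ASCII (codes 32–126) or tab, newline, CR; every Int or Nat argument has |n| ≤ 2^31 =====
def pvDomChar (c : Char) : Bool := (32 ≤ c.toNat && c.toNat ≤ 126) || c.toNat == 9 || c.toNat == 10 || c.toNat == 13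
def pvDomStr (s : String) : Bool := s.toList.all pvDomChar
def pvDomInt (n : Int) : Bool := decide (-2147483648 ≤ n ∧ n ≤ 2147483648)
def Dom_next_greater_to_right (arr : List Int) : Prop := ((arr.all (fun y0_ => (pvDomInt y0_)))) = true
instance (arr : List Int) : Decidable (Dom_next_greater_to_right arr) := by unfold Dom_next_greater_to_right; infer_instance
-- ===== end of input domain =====

-- B replaces A's right-to-left monotonic stack with a simple nested forward
-- scan (first strictly greater element to the right); same return value, no
-- speed claim.

-- ===== PORT A =====
-- A's inner `while stack and stack[-1] <= arr[i]: stack.pop()`.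
-- The stack is kept top-first (head = Python's stack[-1]).
def pvPopA (x : Int) : List Int → List Int
  | [] => []
  | t :: s => if t ≤ x then pvPopA x s else t :: s

-- A's `for i in range(len(arr)-1, -1, -1)` loop: structural recursion from the
-- right; returns (stack, result). `result[i] = stack[-1] if stack` is the
-- stack's head?, `stack.append(arr[i])` is the cons.
def pvLoopA : List Int → List Int × List (Option Int)
  | [] => ([], [])
  | x :: l =>
    let (s, r) := pvLoopA l
    let s' := pvPopA x s
    (x :: s', s'.head? :: r)

def next_greater_to_right (arr : List Int) : List (Option Int) :=
  (pvLoopA arr).2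

-- ===== PORT B =====
-- B's inner loop `for j in range(i+1, n): if arr[j] > arr[i]: … break`:
-- scan the suffix after position i for the first strictly greater element.
def pvFindGreater (x : Int) : List Int → Option Int
  | [] => none
  | y :: l => if y > x then some y else pvFindGreater x l

-- B's outer loop over i: one entry per position, scanning that position's tail.
def next_greater_to_right_alt : List Int → List (Option Int)
  | [] => []
  | x :: l => pvFindGreater x l :: next_greater_to_right_alt l

-- ===== PRECONDITION & SPEC =====
def Spec_next_greater_to_right (arr : List Int) (out : List (Option Int)) : Prop := out = next_greater_to_right_alt arr
instance (arr : List Int) (out : List (Option Int)) : Decidable (Spec_next_greater_to_right arr out) := by unfold Spec_next_greater_to_right; infer_instance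

-- ===== CLAIM (what is proved, stated in full; the proofs are below) =====
def Claim_equal_next_greater_to_right : Prop := ∀ (arr : List Int), Dom_next_greater_to_right arr → Spec_next_greater_to_right arr (next_greater_to_right arr)

-- ===== LEMMAS AND PROOFS =====

-- Popping by a (≤ x) threshold after popping by a smaller one (≤ a) is the
-- same as popping by the larger threshold directly.
theorem pvPopA_pvPopA (x a : Int) (h : a ≤ x) (s : List Int) :
    pvPopA x (pvPopA a s) = pvPopA x s := by
  induction s with
  | nil => rfl
  | cons t s ih =>
    by_cases ht : t ≤ a
    · simp [pvPopA, ht, le_trans ht h, ih]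
    · simp [pvPopA, ht]

-- The head of A's stack after popping everything ≤ x is exactly the first
-- element strictly greater than x in the already-processed suffix.
theorem head_pvPopA (l : List Int) (x : Int) :
    (pvPopA x (pvLoopA l).1).head? = pvFindGreater x l := by
  induction l generalizing x with
  | nil => rfl
  | cons a l ih =>
    by_cases ha : a ≤ x
    · have hgt : ¬ a > x := not_lt.mpr ha
      simp only [pvLoopA, pvPopA, ha, if_pos, pvFindGreater, hgt, if_false]
      rw [pvPopA_pvPopA x a ha, ih]
    · have hgt : a > x := lt_of_not_ge ha
      simp [pvLoopA, pvPopA, ha, pvFindGreater, hgt]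

-- ===== VERDICT (by name: the statement is the Claim_ definition above) =====
theorem pvLoopA_snd (l : List Int) : (pvLoopA l).2 = next_greater_to_right_alt l := by
  induction l with
  | nil => rfl
  | cons x l ih =>
    simp only [pvLoopA, next_greater_to_right_alt]
    rw [← head_pvPopA l x, ← ih]

theorem next_greater_to_right_spec : Claim_equal_next_greater_to_right := by
  intro arr _
  show next_greater_to_right arr = next_greater_to_right_alt arr
  exact pvLoopA_snd arr
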